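-- pv_equiv track=rewrite | github.com/twbeatles/korea-assembly-cc | ui/main_window_impl/capture_dom.py | _build_subtitle_selector_candidates
-- ===== SOURCE A (Python) =====
-- def _build_subtitle_selector_candidates(
--     primary_selector: str, extras: list[str] | None = None
-- ) -> list[str]:
--     """우선순위가 반영된 자막 CSS 셀렉터 후보 목록을 생성한다."""
--     candidates = []
--
--     def _add(sel: str) -> None:
--         if not isinstance(sel, str):
--             return
--         norm = sel.strip()
--         if not norm or norm in candidates:
--             return
--         candidates.append(norm)
--
--     _add(primary_selector or "")
--     for sel in [
--         "#viewSubtit .smi_word:last-child",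
--         "#viewSubtit .smi_word",
--         "#viewSubtit .incont",
--         "#viewSubtit span",
--         "#viewSubtit",
--         ".subtitle_area",
--         ".ai_subtitle",
--         "[class*='subtitle']",
--     ]:
--         _add(sel)
--
--     if extras:
--         for sel in extras:
--             _add(sel)
--
--     broad_selectors = {
--         "#viewSubtit .incont",
--         "#viewSubtit",
--         ".subtitle_area",
--         ".ai_subtitle",
--         "[class*='subtitle']",
--     }
--     priority = {
--         "#viewSubtit .smi_word:last-child": 0,
--         "#viewSubtit .smi_word": 1,
--         "#viewSubtit span": 2,
--         "#viewSubtit .incont": 7,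
--         "#viewSubtit": 8,
--         ".subtitle_area": 9,
--         ".ai_subtitle": 10,
--         "[class*='subtitle']": 11,
--     }
--     primary_norm = (primary_selector or "").strip()
--     order_map = {sel: idx for idx, sel in enumerate(candidates)}
--
--     def _weight(sel: str) -> tuple[int, int]:
--         original_idx = order_map.get(sel, 999)
--         if sel in priority:
--             return priority[sel], original_idx
--         if sel == primary_norm and sel not in broad_selectors:
--             return 3, original_idx
--         if sel in broad_selectors:
--             return 12, original_idx
--         return 4, original_idx
--
--     return sorted(candidates, key=_weight)
-- ===== SOURCE B (Python) =====
-- _TEMPLATE_SELECTORS = [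
--     "#viewSubtit .smi_word:last-child",
--     "#viewSubtit .smi_word",
--     "#viewSubtit .incont",
--     "#viewSubtit span",
--     "#viewSubtit",
--     ".subtitle_area",
--     ".ai_subtitle",
--     "[class*='subtitle']",
-- ]
--
-- _PRIORITY = {
--     "#viewSubtit .smi_word:last-child": 0,
--     "#viewSubtit .smi_word": 1,
--     "#viewSubtit span": 2,
--     "#viewSubtit .incont": 7,
--     "#viewSubtit": 8,
--     ".subtitle_area": 9,
--     ".ai_subtitle": 10,
--     "[class*='subtitle']": 11,
-- }
--
-- _RANK_ORDER = (0, 1, 2, 3, 4, 7, 8, 9, 10, 11)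
--
--
-- def _build_subtitle_selector_candidates(primary_selector, extras=None):
--     """Dedup in one pass with a seen-set, then emit by scanning a fixed rank table."""
--     seen = set()
--     ordered = []
--     for sel in [primary_selector or "", *_TEMPLATE_SELECTORS, *(extras or [])]:
--         if not isinstance(sel, str):
--             continue
--         norm = sel.strip()
--         if norm and norm not in seen:
--             seen.add(norm)
--             ordered.append(norm)
--
--     primary_norm = (primary_selector or "").strip()
--
--     ranked = [(_PRIORITY.get(sel, 3 if sel == primary_norm else 4), sel) for sel in ordered]
--
--     return [sel for rank in _RANK_ORDER for r, sel in ranked if r == rank]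
-- ===== Notes on version B (the rewrite author's own statement) =====
-- stated objective: alternative
-- what changed: Replaces the closure-based dedup (list membership per element) and the final sorted(key=_weight) by a single seen-set dedup pass over the concatenated inputs, a precomputed rank per candidate, and a scan over the fixed 10-entry rank table that emits each rank's candidates in insertion order (no sort, no order_map).
import Mathlib
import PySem

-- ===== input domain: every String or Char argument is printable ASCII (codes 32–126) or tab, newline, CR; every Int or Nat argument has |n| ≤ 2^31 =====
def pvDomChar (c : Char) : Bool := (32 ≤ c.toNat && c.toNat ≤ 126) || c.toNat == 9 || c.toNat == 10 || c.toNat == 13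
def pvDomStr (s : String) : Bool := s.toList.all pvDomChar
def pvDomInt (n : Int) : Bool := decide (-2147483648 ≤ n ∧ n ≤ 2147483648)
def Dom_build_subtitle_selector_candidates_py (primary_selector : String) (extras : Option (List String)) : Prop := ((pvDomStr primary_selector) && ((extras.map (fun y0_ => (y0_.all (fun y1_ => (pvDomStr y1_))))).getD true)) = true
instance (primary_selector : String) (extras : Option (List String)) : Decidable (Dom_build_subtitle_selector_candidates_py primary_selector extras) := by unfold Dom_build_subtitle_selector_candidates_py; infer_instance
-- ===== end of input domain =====

-- B replaces A's closure-based dedup (list membership per element) and final sorted(key=_weight)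
-- by one seen-set dedup pass, a precomputed rank per candidate, and a scan over the fixed rank table.

-- ===== PORT A =====
def pvAddA (cands : List String) (sel : String) : List String :=
  let norm := PySem.Str.strip sel
  if norm = "" ∨ norm ∈ cands then cands else cands ++ [norm]

def pvTemplatesA : List String := [
  "#viewSubtit .smi_word:last-child",
  "#viewSubtit .smi_word",
  "#viewSubtit .incont",
  "#viewSubtit span",
  "#viewSubtit",
  ".subtitle_area",
  ".ai_subtitle",
  "[class*='subtitle']"]

def pvBroadA : PySem.Set String := PySem.Set.ofList [
  "#viewSubtit .incont",
  "#viewSubtit",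
  ".subtitle_area",
  ".ai_subtitle",
  "[class*='subtitle']"]

def pvPriorityA : PySem.Dict String Int := PySem.Dict.ofList [
  ("#viewSubtit .smi_word:last-child", 0),
  ("#viewSubtit .smi_word", 1),
  ("#viewSubtit span", 2),
  ("#viewSubtit .incont", 7),
  ("#viewSubtit", 8),
  (".subtitle_area", 9),
  (".ai_subtitle", 10),
  ("[class*='subtitle']", 11)]

def pvCandidatesA (primary_selector : String) (extras : Option (List String)) : List String :=
  let c0 := pvAddA [] (if primary_selector = "" then "" else primary_selector)
  let c1 := pvTemplatesA.foldl pvAddA c0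
  match extras with
  | none => c1
  | some ex => if ex = [] then c1 else ex.foldl pvAddA c1

def pvWeightA (primary_norm : String) (order_map : PySem.Dict String Int) (sel : String) : Int × Int :=
  let original_idx := order_map.getD sel 999
  match pvPriorityA.get? sel with
  | some p => (p, original_idx)
  | none =>
    if sel = primary_norm ∧ ¬ (PySem.Set.contains pvBroadA sel = true) then (3, original_idx)
    else if PySem.Set.contains pvBroadA sel = true then (12, original_idx)
    else (4, original_idx)

def build_subtitle_selector_candidates_py (primary_selector : String) (extras : Option (List String)) : List String :=
  let candidates := pvCandidatesA primary_selector extras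
  let primary_norm := PySem.Str.strip (if primary_selector = "" then "" else primary_selector)
  let order_map := (PySem.List.enumerate candidates).foldl (fun d p => d.insert p.2 p.1) PySem.Dict.empty
  PySem.List.sorted2 candidates (fun s => (pvWeightA primary_norm order_map s).1)
    (fun s => (pvWeightA primary_norm order_map s).2)

-- ===== PORT B =====
def pvTemplatesB : List String := [
  "#viewSubtit .smi_word:last-child",
  "#viewSubtit .smi_word",
  "#viewSubtit .incont",
  "#viewSubtit span",
  "#viewSubtit",
  ".subtitle_area",
  ".ai_subtitle",
  "[class*='subtitle']"]

def pvPriorityB : PySem.Dict String Int := PySem.Dict.ofList [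
  ("#viewSubtit .smi_word:last-child", 0),
  ("#viewSubtit .smi_word", 1),
  ("#viewSubtit span", 2),
  ("#viewSubtit .incont", 7),
  ("#viewSubtit", 8),
  (".subtitle_area", 9),
  (".ai_subtitle", 10),
  ("[class*='subtitle']", 11)]

def pvRankOrderB : List Int := [0, 1, 2, 3, 4, 7, 8, 9, 10, 11]

def pvDedupStepB (st : PySem.Set String × List String) (sel : String) : PySem.Set String × List String :=
  let norm := PySem.Str.strip sel
  if ¬ norm = "" ∧ ¬ (PySem.Set.contains st.1 norm = true) then (PySem.Set.add st.1 norm, st.2 ++ [norm])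
  else st

def build_subtitle_selector_candidates_py_alt (primary_selector : String) (extras : Option (List String)) : List String :=
  let first := if primary_selector = "" then "" else primary_selector
  let ordered := (((first :: pvTemplatesB) ++ extras.getD []).foldl pvDedupStepB (PySem.Set.empty, [])).2
  let primary_norm := PySem.Str.strip first
  let ranked := ordered.map (fun sel => (pvPriorityB.getD sel (if sel = primary_norm then 3 else 4), sel))
  pvRankOrderB.flatMap (fun rank => (ranked.filter (fun q => q.1 == rank)).map (fun q => q.2))

-- ===== PRECONDITION & SPEC =====
def Spec_build_subtitle_selector_candidates_py (primary_selector : String) (extras : Option (List String)) (out : List String) : Prop := out = build_subtitle_selector_candidates_py_alt primary_selector extras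
instance (primary_selector : String) (extras : Option (List String)) (out : List String) : Decidable (Spec_build_subtitle_selector_candidates_py primary_selector extras out) := by unfold Spec_build_subtitle_selector_candidates_py; infer_instance

-- ===== CLAIM (what is proved, stated in full; the proofs are below) =====
def Claim_equal_build_subtitle_selector_candidates_py : Prop := ∀ (primary_selector : String) (extras : Option (List String)), Dom_build_subtitle_selector_candidates_py primary_selector extras → Spec_build_subtitle_selector_candidates_py primary_selector extras (build_subtitle_selector_candidates_py primary_selector extras)

-- ===== LEMMAS AND PROOFS =====

-- proof-side name for B's per-candidate rank
def pvRankB (primary_norm : String) (sel : String) : Int :=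
  pvPriorityB.getD sel (if sel = primary_norm then 3 else 4)

lemma pv_ranked_filter (f : String → Int) (l : List String) (r : Int) :
    ((l.map (fun s => (f s, s))).filter (fun q => q.1 == r)).map (fun q => q.2)
      = l.filter (fun s => f s == r) := by
  induction l with
  | nil => rfl
  | cons x xs ih => by_cases h : f x = r <;> simp [h, ih]

lemma pv_ofList_append (acc : List String) (y : String) :
    PySem.Set.ofList (acc ++ [y]) = PySem.Set.add (PySem.Set.ofList acc) y := by
  simp [PySem.Set.ofList, List.foldl_append]

-- B's seen-set dedup fold equals A's _add fold (second component), with seen = set of the accumulator.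
lemma pv_dedup_fold_eq (xs : List String) : ∀ (acc : List String),
    xs.foldl pvDedupStepB (PySem.Set.ofList acc, acc)
      = (PySem.Set.ofList (xs.foldl pvAddA acc), xs.foldl pvAddA acc) := by
  induction xs with
  | nil => intro acc; simp
  | cons x xs ih =>
    intro acc
    rw [List.foldl_cons, List.foldl_cons]
    have hstep : pvDedupStepB (PySem.Set.ofList acc, acc) x
        = (PySem.Set.ofList (pvAddA acc x), pvAddA acc x) := by
      simp only [pvDedupStepB, pvAddA]
      by_cases h1 : PySem.Str.strip x = "" <;>
        by_cases h2 : PySem.Str.strip x ∈ acc <;>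
          simp [h1, h2, pv_ofList_append]
    rw [hstep, ih]

-- A's candidate construction is one fold over the concatenated input list.
lemma pv_candidatesA_eq (p : String) (e : Option (List String)) :
    pvCandidatesA p e
      = (((if p = "" then "" else p) :: pvTemplatesA) ++ e.getD []).foldl pvAddA [] := by
  rcases e with _ | ex
  · simp [pvCandidatesA]
  · by_cases hx : ex = [] <;> simp [pvCandidatesA, hx, List.foldl_append]

lemma pv_addA_fold_nodup (xs : List String) : ∀ (acc : List String), acc.Nodup →
    (xs.foldl pvAddA acc).Nodup := by
  induction xs with
  | nil => intro acc h; simpa using h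
  | cons x xs ih =>
    intro acc h
    rw [List.foldl_cons]
    apply ih
    simp only [pvAddA]
    by_cases h1 : PySem.Str.strip x = "" <;> by_cases h2 : PySem.Str.strip x ∈ acc <;>
      simp [h1, h2, List.nodup_append, h]
    exact fun a ha he => h2 (he ▸ ha)

-- order_map characterisation
lemma pv_order_map_not_mem (l : List String) : ∀ (k : Int) (d : PySem.Dict String Int) (sel : String) (v : Int),
    sel ∉ l →
    ((PySem.List.enumerate l k).foldl (fun d p => d.insert p.2 p.1) d).getD sel v = d.getD sel v := by
  induction l with
  | nil => intro k d sel v _; rfl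
  | cons x xs ih =>
    intro k d sel v h
    rw [show PySem.List.enumerate (x :: xs) k = (k, x) :: PySem.List.enumerate xs (k + 1) from rfl,
      List.foldl_cons]
    rw [ih (k + 1) _ sel v (fun hm => h (List.mem_cons_of_mem _ hm))]
    rw [PySem.Dict.getD_insert]
    simp only [List.mem_cons, not_or] at h
    simp [h.1]

lemma pv_order_map_mem (l : List String) : ∀ (k : Int) (d : PySem.Dict String Int) (sel : String) (v : Int),
    l.Nodup → sel ∈ l →
    ((PySem.List.enumerate l k).foldl (fun d p => d.insert p.2 p.1) d).getD sel v = k + (l.idxOf sel : Int) := by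
  induction l with
  | nil => intro _ _ _ _ _ h; simp at h
  | cons x xs ih =>
    intro k d sel v hnd hm
    rw [show PySem.List.enumerate (x :: xs) k = (k, x) :: PySem.List.enumerate xs (k + 1) from rfl,
      List.foldl_cons]
    rcases List.mem_cons.mp hm with rfl | hm'
    · rw [pv_order_map_not_mem xs (k+1) _ sel v (by simpa using (List.nodup_cons.mp hnd).1)]
      rw [PySem.Dict.getD_insert]
      simp
    · have hne : sel ≠ x := fun he => (List.nodup_cons.mp hnd).1 (he ▸ hm')
      rw [ih (k + 1) _ sel v (List.nodup_cons.mp hnd).2 hm']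
      rw [List.idxOf_cons_ne _ (Ne.symm hne)]
      push_cast
      ring

lemma pv_nodup_pairwise_idxOf (l : List String) (h : l.Nodup) :
    l.Pairwise (fun a b => l.idxOf a < l.idxOf b) := by
  rw [List.pairwise_iff_getElem]
  intro i j hi hj hij
  rw [List.Nodup.idxOf_getElem h i hi, List.Nodup.idxOf_getElem h j hj]
  exact hij

-- every broad selector is a priority key, so A's 12-branch is unreachable
lemma pv_broad_in_priority (sel : String) (h : PySem.Set.contains pvBroadA sel = true) :
    (pvPriorityA.get? sel).isSome := by
  have hm : sel ∈ ["#viewSubtit .incont", "#viewSubtit", ".subtitle_area", ".ai_subtitle", "[class*='subtitle']"] := by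
    have : sel ∈ pvBroadA := by
      have := h
      unfold PySem.Set.contains at this
      exact List.contains_iff_mem.mp this
    simpa [pvBroadA] using (PySem.Set.mem_ofList _ sel).mp this
  fin_cases hm <;> decide

lemma pv_weight1_eq (pn : String) (om : PySem.Dict String Int) (sel : String) :
    (pvWeightA pn om sel).1 = pvRankB pn sel := by
  unfold pvWeightA pvRankB
  rw [show pvPriorityB = pvPriorityA from rfl]
  rcases hp : pvPriorityA.get? sel with _ | v
  · have hb : ¬ (PySem.Set.contains pvBroadA sel = true) := fun h => by
      have := pv_broad_in_priority sel h
      rw [hp] at this; simp at this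
    have hb' : sel ∉ pvBroadA := fun hm =>
      hb (by unfold PySem.Set.contains; exact List.contains_iff_mem.mpr hm)
    simp only [PySem.Dict.getD, hp, Option.getD_none]
    by_cases hpn : sel = pn
    · subst hpn; simp [hb']
    · simp [hpn, hb']
  · simp [PySem.Dict.getD, hp]

lemma pv_weight2_eq (pn : String) (om : PySem.Dict String Int) (sel : String) :
    (pvWeightA pn om sel).2 = om.getD sel 999 := by
  unfold pvWeightA
  rcases hp : pvPriorityA.get? sel with _ | v
  · simp
    split_ifs <;> rfl
  · rfl

lemma pv_rank_mem (pn : String) (sel : String) : pvRankB pn sel ∈ pvRankOrderB := by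
  unfold pvRankB pvRankOrderB
  rw [show pvPriorityB = pvPriorityA from rfl, PySem.Dict.getD]
  rcases hp : pvPriorityA.get? sel with _ | v
  · by_cases hpn : sel = pn <;> simp [hpn]
  · have hmem := PySem.Dict.mem_items_of_get?_eq_some _ hp
    have hit : pvPriorityA.items = [
      ("#viewSubtit .smi_word:last-child", 0),
      ("#viewSubtit .smi_word", 1),
      ("#viewSubtit span", 2),
      ("#viewSubtit .incont", 7),
      ("#viewSubtit", 8),
      (".subtitle_area", 9),
      (".ai_subtitle", 10),
      ("[class*='subtitle']", 11)] := by decide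
    rw [hit] at hmem
    simp [Prod.ext_iff] at hmem ⊢
    rcases hmem with ⟨_, rfl⟩ | ⟨_, rfl⟩ | ⟨_, rfl⟩ | ⟨_, rfl⟩ | ⟨_, rfl⟩ | ⟨_, rfl⟩ | ⟨_, rfl⟩ | ⟨_, rfl⟩ <;> simp

-- sorted with a two-component key is sorted with the lexicographic key
lemma pv_sorted2_eq_sorted_lex {α : Type} (xs : List α) (k1 k2 : α → Int) :
    PySem.List.sorted2 xs k1 k2 = PySem.List.sorted xs (fun x => toLex (k1 x, k2 x)) := by
  rw [PySem.List.sorted_eq_foldl_insertBy]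
  show List.foldl (fun acc x => PySem.List.insertBy _ x acc) [] xs = _
  congr 1
  funext acc x
  congr 1
  funext a b
  simp only [Prod.Lex.toLex_lt_toLex]
  by_cases h1 : k1 a < k1 b <;> by_cases h2 : k1 b < k1 a <;> by_cases h3 : k2 a < k2 b <;>
    by_cases h4 : k1 a = k1 b <;> simp [h1, h2, h3, h4] <;> omega

lemma pv_flatMap_filter_perm (rank : String → Int) : ∀ (rs : List Int), rs.Nodup →
    ∀ (l : List String), (∀ x ∈ l, rank x ∈ rs) →
    (rs.flatMap (fun r => l.filter (fun x => rank x == r))).Perm l := by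
  intro rs
  induction rs with
  | nil =>
    intro _ l hcov
    have : l = [] := List.eq_nil_iff_forall_not_mem.mpr (fun x hx => by simpa using hcov x hx)
    simp [this]
  | cons r rs ih =>
    intro hnd l hcov
    rw [List.flatMap_cons]
    have hnotin : r ∉ rs := (List.nodup_cons.mp hnd).1
    have hrest : rs.flatMap (fun r' => l.filter (fun x => rank x == r'))
        = rs.flatMap (fun r' => (l.filter (fun x => !(rank x == r))).filter (fun x => rank x == r')) := by
      apply List.flatMap_congr
      intro r' hr'
      rw [List.filter_filter]
      apply List.filter_congr
      intro x _
      by_cases hx : rank x = r'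
      · have hne : r' ≠ r := fun he => hnotin (he ▸ hr')
        simp [hx, hne]
      · simp [hx]
    rw [hrest]
    have hperm := ih (List.nodup_cons.mp hnd).2 (l.filter (fun x => !(rank x == r)))
      (fun x hx => by
        rcases List.mem_filter.mp hx with ⟨hxl, hxr⟩
        have := hcov x hxl
        rcases List.mem_cons.mp this with he | h'
        · exact absurd (by simpa using he) (by simpa using hxr)
        · exact h')
    exact (hperm.append_left _).trans (List.filter_append_perm _ l)

lemma pv_flatMap_filter_pairwise (rank idx : String → Int) : ∀ (rs : List Int), rs.Pairwise (· < ·) →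
    ∀ (l : List String), l.Pairwise (fun a b => idx a < idx b) →
    (rs.flatMap (fun r => l.filter (fun x => rank x == r))).Pairwise
      (fun a b => rank a < rank b ∨ (rank a = rank b ∧ idx a < idx b)) := by
  intro rs
  induction rs with
  | nil => intro _ l _; simp
  | cons r rs ih =>
    intro hrs l hl
    rw [List.flatMap_cons]
    rw [List.pairwise_append]
    refine ⟨?_, ih (List.pairwise_cons.mp hrs).2 l hl, ?_⟩
    · refine (hl.filter _).imp_of_mem ?_
      intro a b ha hb hab
      have h1 : rank a = r := by simpa using (List.mem_filter.mp ha).2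
      have h2 : rank b = r := by simpa using (List.mem_filter.mp hb).2
      exact Or.inr ⟨h1.trans h2.symm, hab⟩
    · intro a ha b hb
      have h1 : rank a = r := by simpa using (List.mem_filter.mp ha).2
      rcases List.mem_flatMap.mp hb with ⟨r', hr', hbf⟩
      have h2 : rank b = r' := by simpa using (List.mem_filter.mp hbf).2
      exact Or.inl (by rw [h1, h2]; exact (List.pairwise_cons.mp hrs).1 r' hr')

-- ===== VERDICT (by name: the statement is the Claim_ definition above) =====
theorem build_subtitle_selector_candidates_py_spec : Claim_equal_build_subtitle_selector_candidates_py := by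
  intro p e _
  unfold Spec_build_subtitle_selector_candidates_py
  show PySem.List.sorted2 (pvCandidatesA p e) _ _
      = pvRankOrderB.flatMap (fun rank =>
          (((((if p = "" then "" else p) :: pvTemplatesB) ++ e.getD []).foldl pvDedupStepB (PySem.Set.empty, [])).2.map
              (fun sel => (pvPriorityB.getD sel
                (if sel = PySem.Str.strip (if p = "" then "" else p) then 3 else 4), sel))
            |>.filter (fun q => q.1 == rank)).map (fun q => q.2))
  have ht : pvTemplatesB = pvTemplatesA := rfl
  have hord : ((((if p = "" then "" else p) :: pvTemplatesB) ++ e.getD []).foldl pvDedupStepB (PySem.Set.empty, [])).2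
      = pvCandidatesA p e := by
    rw [ht, show (PySem.Set.empty : PySem.Set String) = PySem.Set.ofList [] from rfl,
      pv_dedup_fold_eq, ← pv_candidatesA_eq]
  rw [hord]
  set c := pvCandidatesA p e with hc
  set pn := PySem.Str.strip (if p = "" then "" else p) with hpn
  set om := (PySem.List.enumerate c).foldl (fun d p => d.insert p.2 p.1) PySem.Dict.empty with hom
  have hrw : ∀ r : Int, ((c.map (fun sel => (pvPriorityB.getD sel (if sel = pn then 3 else 4), sel))).filter
      (fun q => q.1 == r)).map (fun q => q.2) = c.filter (fun sel => pvRankB pn sel == r) :=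
    fun r => pv_ranked_filter (pvRankB pn) c r
  rw [List.flatMap_congr (fun r _ => hrw r)]
  have hnd : c.Nodup := by
    rw [hc, pv_candidatesA_eq]
    exact pv_addA_fold_nodup _ [] List.nodup_nil
  rw [pv_sorted2_eq_sorted_lex]
  apply PySem.List.sorted_eq_of_perm_of_pairwise_lt
  · exact pv_flatMap_filter_perm (pvRankB pn) pvRankOrderB (by decide) c (fun x _ => pv_rank_mem pn x)
  · have hpidx : c.Pairwise (fun a b => (c.idxOf a : Int) < (c.idxOf b : Int)) :=
      (pv_nodup_pairwise_idxOf c hnd).imp (fun h => by exact_mod_cast h)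
    have hpw := pv_flatMap_filter_pairwise (pvRankB pn) (fun s => (c.idxOf s : Int)) pvRankOrderB
      (by decide) c hpidx
    refine hpw.imp_of_mem ?_
    intro a b ha hb hR
    have hmem : ∀ x, x ∈ pvRankOrderB.flatMap (fun r => c.filter (fun s => pvRankB pn s == r)) → x ∈ c := by
      intro x hx
      rcases List.mem_flatMap.mp hx with ⟨r, _, hxf⟩
      exact (List.mem_filter.mp hxf).1
    have hka : (pvWeightA pn om a).2 = (c.idxOf a : Int) := by
      rw [pv_weight2_eq, hom, pv_order_map_mem c 0 _ a 999 hnd (hmem a ha)]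
      ring
    have hkb : (pvWeightA pn om b).2 = (c.idxOf b : Int) := by
      rw [pv_weight2_eq, hom, pv_order_map_mem c 0 _ b 999 hnd (hmem b hb)]
      ring
    rw [Prod.Lex.toLex_lt_toLex]
    rcases hR with h | ⟨he, hi⟩
    · exact Or.inl (by rw [pv_weight1_eq, pv_weight1_eq]; exact h)
    · exact Or.inr ⟨by rw [pv_weight1_eq, pv_weight1_eq]; exact he, by rw [hka, hkb]; exact hi⟩
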